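-- pv_equiv track=rewrite | github.com/momomorgentau/materials | 20230617/abc206e.py | s2i
-- ===== SOURCE A (Python) =====
-- M = 52
--
-- a = 97
--
-- A = 65
--
-- def s2i(str):
--   now = 0
--   for c in str:
--     now *= M
--     if c.islower():
--       now += ord(c) - a
--     else:
--       now += ord(c) - A + M // 2
--   return now
-- ===== SOURCE B (Python) =====
-- def s2i(str):
--   now = 0
--   p = 1
--   for c in reversed(str):
--     if c.islower():
--       d = ord(c) - 97
--     else:
--       d = ord(c) - 65 + 26
--     now += d * p
--     p *= 52
--   return now
-- ===== Notes on version B (the rewrite author's own statement) =====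
-- stated objective: alternative
-- what changed: Replaces the forward Horner accumulator (now = now*52 + digit) with a reversed traversal that maintains an explicit running place value p, adding digit*p per character; same per-character digit mapping.
import Mathlib
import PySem

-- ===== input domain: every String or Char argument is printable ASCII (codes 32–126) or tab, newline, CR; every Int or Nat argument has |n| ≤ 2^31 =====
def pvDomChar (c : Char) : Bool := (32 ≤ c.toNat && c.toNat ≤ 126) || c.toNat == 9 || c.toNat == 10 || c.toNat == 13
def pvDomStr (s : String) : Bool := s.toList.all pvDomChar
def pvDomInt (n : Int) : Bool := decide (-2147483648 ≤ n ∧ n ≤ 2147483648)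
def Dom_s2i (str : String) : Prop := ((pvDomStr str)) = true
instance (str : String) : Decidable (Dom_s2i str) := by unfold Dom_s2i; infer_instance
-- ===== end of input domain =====

-- B replaces A's forward Horner pass with a reversed traversal maintaining an explicit place value (alternative decomposition, same cost).


-- ===== PORT A =====
-- literal transliteration: now *= M; then branch on islower; M // 2 ported as PySem.Int.floordiv
def s2i (str : String) : Int :=
  str.toList.foldl
    (fun now c =>
      let now := now * 52
      if PySem.Chars.islower c then now + ((c.toNat : Int) - 97)
      else now + ((c.toNat : Int) - 65 + PySem.Int.floordiv 52 2)) 0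

-- ===== PORT B =====
-- reversed traversal with state (now, p): now += d * p; p *= 52
def s2i_alt (str : String) : Int :=
  (str.toList.reverse.foldl
    (fun (st : Int × Int) c =>
      let d : Int := if PySem.Chars.islower c then (c.toNat : Int) - 97
                     else (c.toNat : Int) - 65 + 26
      (st.1 + d * st.2, st.2 * 52)) ((0 : Int), (1 : Int))).1

-- ===== PRECONDITION & SPEC =====
def Spec_s2i (str : String) (out : Int) : Prop := out = s2i_alt str
instance (str : String) (out : Int) : Decidable (Spec_s2i str out) := by unfold Spec_s2i; infer_instance

-- ===== CLAIM (what is proved, stated in full; the proofs are below) =====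
def Claim_equal_s2i : Prop := ∀ (str : String), Dom_s2i str → Spec_s2i str (s2i str)

-- ===== LEMMAS AND PROOFS =====

-- the common per-character digit value
def pvDigit (c : Char) : Int :=
  if PySem.Chars.islower c then (c.toNat : Int) - 97 else (c.toNat : Int) - 65 + 26

-- A's fold step written via pvDigit
lemma stepA_eq (now : Int) (c : Char) :
    (fun now c =>
      let now := now * 52
      if PySem.Chars.islower c then now + ((c.toNat : Int) - 97)
      else now + ((c.toNat : Int) - 65 + PySem.Int.floordiv 52 2)) now c
      = now * 52 + pvDigit c := by
  have h : PySem.Int.floordiv 52 2 = 26 := by decide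
  simp only [pvDigit, h]
  split_ifs <;> ring

-- Horner with an arbitrary initial accumulator
lemma horner_shift (t : List Char) : ∀ a : Int,
    t.foldl (fun now c => now * 52 + pvDigit c) a
      = a * 52 ^ t.length + t.foldl (fun now c => now * 52 + pvDigit c) 0 := by
  induction t with
  | nil => intro a; simp
  | cons c t ih =>
    intro a
    simp only [List.foldl_cons, List.length_cons]
    rw [ih (a * 52 + pvDigit c), ih (0 * 52 + pvDigit c)]
    ring

-- the reversed loop computes the Horner value scaled by the incoming place value
lemma rev_loop (t : List Char) : ∀ now p : Int,
    t.reverse.foldl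
      (fun (st : Int × Int) c =>
        let d : Int := if PySem.Chars.islower c then (c.toNat : Int) - 97
                       else (c.toNat : Int) - 65 + 26
        (st.1 + d * st.2, st.2 * 52)) (now, p)
      = (now + p * t.foldl (fun now c => now * 52 + pvDigit c) 0, p * 52 ^ t.length) := by
  induction t with
  | nil => intro now p; simp
  | cons c t ih =>
    intro now p
    rw [List.reverse_cons, List.foldl_append, ih now p]
    simp only [List.foldl_cons, List.foldl_nil, List.foldl_cons, List.length_cons]
    have h0 : t.foldl (fun now c => now * 52 + pvDigit c) (0 * 52 + pvDigit c)
        = pvDigit c * 52 ^ t.length + t.foldl (fun now c => now * 52 + pvDigit c) 0 := by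
      rw [horner_shift]; ring_nf
    rw [h0]
    simp only [pvDigit, Prod.mk.injEq]
    constructor <;> ring

-- ===== VERDICT (by name: the statement is the Claim_ definition above) =====
theorem s2i_spec : Claim_equal_s2i := by
  intro str _
  unfold Spec_s2i s2i s2i_alt
  have hA : str.toList.foldl
      (fun now c =>
        let now := now * 52
        if PySem.Chars.islower c then now + ((c.toNat : Int) - 97)
        else now + ((c.toNat : Int) - 65 + PySem.Int.floordiv 52 2)) 0
      = str.toList.foldl (fun now c => now * 52 + pvDigit c) 0 := by
    have h : (fun now c =>
        let now := now * 52
        if PySem.Chars.islower c then now + ((c.toNat : Int) - 97)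
        else now + ((c.toNat : Int) - 65 + PySem.Int.floordiv 52 2))
        = fun (now : Int) c => now * 52 + pvDigit c := by
      funext now c; exact stepA_eq now c
    rw [h]
  rw [hA, rev_loop]
  simp
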